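-- pv_equiv track=rewrite | github.com/geoffmazeroff/DataStructuresAndAlgorithms | ch8-dictionaries.py | find_missing_letters
-- ===== SOURCE A (Python) =====
-- import string
--
-- def find_missing_letters(phrase):
--
--     # O(N) to build up the bookkeeping
--     found_chars = {}
--     for c in phrase:
--         found_chars[c] = True
--
--     # O(26) --> O(1) to check each lowercase letter
--     missing_letters = []
--     for c in string.ascii_lowercase:
--         if c not in found_chars:
--             missing_letters.append(c)
--
--     return missing_letters
-- ===== SOURCE B (Python) =====
-- import string
--
--
-- def find_missing_letters(phrase):
--     # Start with all 26 letters as candidates and eliminate in one pass.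
--     missing = set(string.ascii_lowercase)
--     for c in phrase:
--         missing.discard(c)
--     return sorted(missing)
-- ===== Notes on version B (the rewrite author's own statement) =====
-- stated objective: alternative
-- what changed: B starts from the full 26-letter candidate set and discards each character of the phrase in a single elimination pass, then sorts the survivors, instead of building a found-characters dict and scanning the alphabet against it.
import Mathlib
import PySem

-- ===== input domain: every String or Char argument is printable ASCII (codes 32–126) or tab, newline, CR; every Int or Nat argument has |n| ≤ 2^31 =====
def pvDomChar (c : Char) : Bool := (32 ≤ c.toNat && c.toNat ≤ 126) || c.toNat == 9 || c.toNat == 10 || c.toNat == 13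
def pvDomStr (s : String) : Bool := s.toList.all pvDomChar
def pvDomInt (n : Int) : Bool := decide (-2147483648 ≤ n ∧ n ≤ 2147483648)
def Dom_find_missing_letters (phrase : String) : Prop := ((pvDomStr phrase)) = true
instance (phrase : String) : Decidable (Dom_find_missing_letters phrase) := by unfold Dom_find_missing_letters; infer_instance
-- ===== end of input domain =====

-- B eliminates phrase characters from a full 26-letter candidate set in one pass and sorts the
-- survivors, instead of A's found-characters dict scanned against the alphabet (alternative decomposition).


-- ===== PORT A =====
def find_missing_letters (phrase : String) : List String :=
  -- found_chars = {}; for c in phrase: found_chars[c] = True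
  let found_chars : PySem.Dict Char Bool :=
    phrase.toList.foldl (fun d c => d.insert c true) PySem.Dict.empty
  -- missing_letters = []; for c in string.ascii_lowercase: if c not in found_chars: append(c)
  "abcdefghijklmnopqrstuvwxyz".toList.foldl
    (fun acc c => if !found_chars.contains c then acc ++ [String.ofList [c]] else acc) []

-- ===== PORT B =====
def find_missing_letters_alt (phrase : String) : List String :=
  -- missing = set(string.ascii_lowercase); for c in phrase: missing.discard(c); return sorted(missing)
  let missing : PySem.Set Char := PySem.Set.ofList "abcdefghijklmnopqrstuvwxyz".toList
  let remaining := phrase.toList.foldl (fun s c => PySem.Set.discard s c) missing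
  (PySem.List.sorted remaining (fun c => c)).map (fun c => String.ofList [c])

-- ===== PRECONDITION & SPEC =====
def Spec_find_missing_letters (phrase : String) (out : List String) : Prop := out = find_missing_letters_alt phrase
instance (phrase : String) (out : List String) : Decidable (Spec_find_missing_letters phrase out) := by unfold Spec_find_missing_letters; infer_instance

-- ===== CLAIM (what is proved, stated in full; the proofs are below) =====
def Claim_equal_find_missing_letters : Prop := ∀ (phrase : String), Dom_find_missing_letters phrase → Spec_find_missing_letters phrase (find_missing_letters phrase)

-- ===== LEMMAS AND PROOFS =====

-- folding Set.discard over a list filters out exactly that list's elements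
theorem foldl_discard_eq_filter (l s : List Char) :
    l.foldl (fun s c => PySem.Set.discard s c) s
      = s.filter (fun y => decide (y ∉ l)) := by
  induction l generalizing s with
  | nil => simp
  | cons c t ih =>
      rw [List.foldl_cons, ih]
      simp only [PySem.Set.discard, List.filter_filter]
      apply List.filter_congr
      intro y _
      by_cases hy : y = c <;> simp [hy]

-- membership in A's found_chars dict is membership in the phrase
theorem contains_found (l : List Char) (c : Char) :
    ((l.foldl (fun d c => d.insert c true) (PySem.Dict.empty : PySem.Dict Char Bool)).contains c)
      = decide (c ∈ l) := by
  rw [PySem.Dict.contains_eq_decide_mem_keys]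
  rw [PySem.Dict.keys_foldl_insert l (fun _ _ => true) PySem.Dict.empty]
  simp [PySem.Set.mem_update, PySem.Dict.empty]

-- ===== VERDICT (by name: the statement is the Claim_ definition above) =====
theorem find_missing_letters_spec : Claim_equal_find_missing_letters := by
  intro phrase _
  simp only [Spec_find_missing_letters, find_missing_letters, find_missing_letters_alt]
  rw [PySem.Set.ofList_eq_self_of_nodup _ (by decide)]
  rw [foldl_discard_eq_filter]
  rw [PySem.List.sorted_eq_self_of_pairwise _ _
    (List.Pairwise.filter _ (by decide : List.Pairwise (fun a b : Char => a ≤ b) "abcdefghijklmnopqrstuvwxyz".toList))]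
  rw [PySem.List.foldl_append_if (fun c =>
      !((phrase.toList.foldl (fun d c => d.insert c true) (PySem.Dict.empty : PySem.Dict Char Bool)).contains c))
      (fun c => String.ofList [c]) _ []]
  simp only [contains_found]
  simp
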